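-- pv_equiv track=rewrite | github.com/Andrii-itehnolog/hub | HT_05/task_1.py | get_season
-- ===== SOURCE A (Python) =====
-- def get_season(number_of_month):
--     season_dict = {
--         "winter": (12, 1, 2),
--         "spring": (3, 4, 5),
--         "summer": (6, 7, 8),
--         "autumn": (9, 10, 11)
--     }
--     if number_of_month in range(1, 13):
--         for key, value in season_dict.items():
--             if number_of_month in value:
--                 return key
--     else:
--         return "Wrong input! Value must be only number between 1 and 12!"
-- ===== SOURCE B (Python) =====
-- def get_season(number_of_month):
--     if number_of_month in range(1, 13):
--         return ("winter", "spring", "summer", "autumn")[int(number_of_month) % 12 // 3]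
--     else:
--         return "Wrong input! Value must be only number between 1 and 12!"
-- ===== Notes on version B (the rewrite author's own statement) =====
-- stated objective: idiomatic
-- what changed: Replaces the season dict plus membership loop with a closed-form arithmetic index (n % 12 // 3) into a tuple of season names.
import Mathlib
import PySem

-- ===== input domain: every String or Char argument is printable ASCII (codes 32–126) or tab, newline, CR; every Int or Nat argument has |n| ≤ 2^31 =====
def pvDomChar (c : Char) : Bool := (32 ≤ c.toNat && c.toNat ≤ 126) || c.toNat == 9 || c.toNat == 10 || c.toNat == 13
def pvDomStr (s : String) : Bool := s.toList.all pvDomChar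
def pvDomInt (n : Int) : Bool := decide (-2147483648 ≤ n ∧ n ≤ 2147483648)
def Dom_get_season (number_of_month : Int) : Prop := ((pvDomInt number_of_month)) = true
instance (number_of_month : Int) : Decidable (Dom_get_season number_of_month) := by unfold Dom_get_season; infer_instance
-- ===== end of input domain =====

-- B replaces A's season dict + membership scan with a closed-form arithmetic index into a fixed name list (idiomatic; same cost).
-- ===== PORT A =====
-- A: build the season dict, guard the range, scan items for a tuple containing the month.
def get_season (number_of_month : Int) : Option String :=
  let season_dict : PySem.Dict String (List Int) :=
    PySem.Dict.mk
      [("winter", [12, 1, 2]), ("spring", [3, 4, 5]),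
       ("summer", [6, 7, 8]), ("autumn", [9, 10, 11])]
  if 1 ≤ number_of_month ∧ number_of_month < 13 then
    -- for key, value in season_dict.items(): if number_of_month in value: return key
    (season_dict.items.findSome? fun kv =>
      if number_of_month ∈ kv.2 then some kv.1 else none)
  else
    some "Wrong input! Value must be only number between 1 and 12!"

-- ===== PORT B =====
-- B: closed-form index (n % 12 // 3) into the tuple of season names.
def get_season_alt (number_of_month : Int) : Option String :=
  if 1 ≤ number_of_month ∧ number_of_month < 13 then
    PySem.List.pyGet? ["winter", "spring", "summer", "autumn"]
      (PySem.Int.floordiv (PySem.Int.mod number_of_month 12) 3)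
  else
    some "Wrong input! Value must be only number between 1 and 12!"

-- ===== PRECONDITION & SPEC =====
def Spec_get_season (number_of_month : Int) (out : Option String) : Prop := out = get_season_alt number_of_month
instance (number_of_month : Int) (out : Option String) : Decidable (Spec_get_season number_of_month out) := by unfold Spec_get_season; infer_instance

-- ===== CLAIM (what is proved, stated in full; the proofs are below) =====
def Claim_equal_get_season : Prop := ∀ (number_of_month : Int), Dom_get_season number_of_month → Spec_get_season number_of_month (get_season number_of_month)

-- ===== LEMMAS AND PROOFS =====

-- ===== VERDICT (by name: the statement is the Claim_ definition above) =====
theorem get_season_spec : Claim_equal_get_season := by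
  intro n _
  unfold Spec_get_season
  by_cases h : 1 ≤ n ∧ n < 13
  · obtain ⟨h1, h2⟩ := h
    interval_cases n <;> simp [get_season, get_season_alt, PySem.Int.floordiv, PySem.Int.mod, PySem.List.pyGet?, PySem.List.pyIdx?, List.findSome?]
  · simp [get_season, get_season_alt, h]
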